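-- pv_equiv track=rewrite | github.com/TianjinDuan01/hw5-tianjinduan | .agents/skills/business-hours-sla/scripts/calculate_breach.py | validate_working_days
-- ===== SOURCE A (Python) =====
-- from typing import Any, Dict, List, Optional
--
-- def validate_working_days(days: List[int]) -> List[int]:
--     if not days:
--         raise ValueError("working_days must not be empty.")
--     invalid = [day for day in days if day < 0 or day > 6]
--     if invalid:
--         raise ValueError(f"working_days contains invalid values: {invalid}")
--     deduped = sorted(set(days))
--     return deduped
-- ===== SOURCE B (Python) =====
-- def validate_working_days(days):
--     # single pass: fused accumulator (presence set, invalid list)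
--     present = set()
--     invalid = []
--     for day in days:
--         if 0 <= day <= 6:
--             present.add(day)
--         else:
--             invalid.append(day)
--     if not days:
--         raise ValueError("working_days must not be empty.")
--     if invalid:
--         raise ValueError(f"working_days contains invalid values: {invalid}")
--     # bounded domain: emit by scanning the fixed 0..6 table
--     return [i for i in range(7) if i in present]
-- ===== Notes on version B (the rewrite author's own statement) =====
-- stated objective: alternative
-- what changed: Replaces A's two comprehension passes plus sorted(set(days)) by one fused fold that simultaneously builds a presence set and the invalid list, emitting the result by scanning the fixed 0..6 table instead of sorting.
import Mathlib
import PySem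

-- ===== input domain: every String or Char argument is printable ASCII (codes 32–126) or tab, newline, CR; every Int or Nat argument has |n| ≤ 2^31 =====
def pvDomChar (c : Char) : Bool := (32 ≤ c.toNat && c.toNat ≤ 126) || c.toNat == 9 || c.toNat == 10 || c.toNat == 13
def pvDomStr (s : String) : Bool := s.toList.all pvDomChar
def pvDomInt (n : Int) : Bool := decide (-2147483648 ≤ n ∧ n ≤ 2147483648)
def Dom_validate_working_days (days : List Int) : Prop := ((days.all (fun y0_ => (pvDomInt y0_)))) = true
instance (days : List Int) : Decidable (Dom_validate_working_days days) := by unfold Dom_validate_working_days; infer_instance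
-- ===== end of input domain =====

-- B fuses validation and dedup into one fold (presence set + invalid list) and emits by
-- scanning the fixed 0..6 table instead of sorting a set; same raises, same result.

-- ===== PORT A =====
-- where the Python raises ValueError (empty input, or some day outside 0..6) the port
-- returns []; exactly those inputs are excluded by Pre_validate_working_days
def validate_working_days (days : List Int) : List Int :=
  if days = [] then []
  else
    let invalid := days.filter (fun day => decide (day < 0) || decide (day > 6))
    if invalid ≠ [] then []
    else PySem.List.sorted (PySem.Set.ofList days) (fun x => x) false

-- ===== PORT B =====
-- one fold over days carrying (present : Set, invalid : List); raises port as []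
def validate_working_days_alt (days : List Int) : List Int :=
  let st := days.foldl
    (fun (st : PySem.Set Int × List Int) day =>
      if 0 ≤ day ∧ day ≤ 6 then (PySem.Set.add st.1 day, st.2)
      else (st.1, st.2 ++ [day]))
    (PySem.Set.empty, [])
  if days = [] then []
  else if st.2 ≠ [] then []
  else (PySem.List.pyRange 0 7 1).filter (fun i => PySem.Set.contains st.1 i)

-- ===== PRECONDITION & SPEC =====
-- Pre_ excludes exactly the inputs on which A raises ValueError: the empty list and any
-- list containing a day outside 0..6.
def Pre_validate_working_days (days : List Int) : Prop :=
  days ≠ [] ∧ ∀ d ∈ days, 0 ≤ d ∧ d ≤ 6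
instance (days : List Int) : Decidable (Pre_validate_working_days days) := by
  unfold Pre_validate_working_days; infer_instance
def pvWitness_validate_working_days : List Int := [3, 0, 3, 6]

def Spec_validate_working_days (days : List Int) (out : List Int) : Prop := out = validate_working_days_alt days
instance (days : List Int) (out : List Int) : Decidable (Spec_validate_working_days days out) := by unfold Spec_validate_working_days; infer_instance

-- ===== CLAIM (what is proved, stated in full; the proofs are below) =====
def Claim_equal_validate_working_days : Prop := ∀ (days : List Int), Dom_validate_working_days days → Pre_validate_working_days days → Spec_validate_working_days days (validate_working_days days)

-- ===== LEMMAS AND PROOFS =====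

-- with every day in 0..6 the fused fold only ever takes the add branch:
-- it is foldl Set.add on the first component and leaves the accumulator unchanged
theorem fused_fold_eq (days : List Int) (p : PySem.Set Int) (acc : List Int)
    (hall : ∀ d ∈ days, 0 ≤ d ∧ d ≤ 6) :
    days.foldl
      (fun (st : PySem.Set Int × List Int) day =>
        if 0 ≤ day ∧ day ≤ 6 then (PySem.Set.add st.1 day, st.2)
        else (st.1, st.2 ++ [day]))
      (p, acc) = (days.foldl PySem.Set.add p, acc) := by
  induction days generalizing p with
  | nil => rfl
  | cons d ds ih =>
    have hd := hall d (List.mem_cons_self ..)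
    simp only [List.foldl_cons, if_pos hd]
    exact ih _ (fun x hx => hall x (List.mem_cons_of_mem _ hx))

-- sorted(set(days)) is the strictly increasing scan of 0..6 kept by membership in set(days)
theorem sorted_set_eq_range_scan (days : List Int)
    (hall : ∀ d ∈ days, 0 ≤ d ∧ d ≤ 6) :
    PySem.List.sorted (PySem.Set.ofList days) (fun x => x) false
      = (PySem.List.pyRange 0 7 1).filter
          (fun i => PySem.Set.contains (PySem.Set.ofList days) i) := by
  apply PySem.List.sorted_eq_of_perm_of_pairwise_lt
  · rw [List.perm_ext_iff_of_nodup]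
    · intro x
      simp only [List.mem_filter, PySem.List.mem_pyRange_one, PySem.Set.mem_ofList,
        PySem.Set.contains, List.contains_eq_mem, decide_eq_true_eq, PySem.Set.mem_ofList]
      constructor
      · rintro ⟨_, hx⟩; exact hx
      · intro hx; exact ⟨⟨(hall x hx).1, by have := (hall x hx).2; omega⟩, hx⟩
    · exact (PySem.List.nodup_pyRange_one 0 7).filter _
    · exact PySem.Set.nodup_ofList days
  · exact (PySem.List.pairwise_lt_pyRange_one 0 7).filter _

-- ===== VERDICT (by name: the statement is the Claim_ definition above) =====
theorem validate_working_days_spec : Claim_equal_validate_working_days := by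
  intro days _ hpre
  obtain ⟨hne, hall⟩ := hpre
  unfold Spec_validate_working_days validate_working_days validate_working_days_alt
  have hinv : days.filter (fun day => decide (day < 0) || decide (day > 6)) = [] := by
    rw [List.filter_eq_nil_iff]
    intro d hd
    have := hall d hd
    simp only [Bool.or_eq_true, decide_eq_true_eq, not_or]
    omega
  rw [fused_fold_eq days PySem.Set.empty [] hall]
  simp only [hne, hinv, ne_eq, not_true_eq_false, if_false]
  rw [sorted_set_eq_range_scan days hall, PySem.Set.ofList_eq_foldl]
  rfl
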